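-- pv_equiv track=rewrite | github.com/wongzc/NUS_IT5001_PE_answer | IT5001 2022_23 SEM2 PE.py | plinko_i
-- ===== SOURCE A (Python) =====
-- def plinko_i(seq,b,m,s):
--     if not b or not m or not s:
--         return 0
--     for i,p in enumerate(seq):
--         if p==0:
--             b-=1
--         elif p==1:
--             m-=1
--         elif p==2:
--             s-=1
--         if not b or not m or not s:
--             return i+1
--     return len(seq)
-- ===== SOURCE B (Python) =====
-- def deplete(seq, t, c):
--     # 1-based index at which a counter starting at c for value t reaches exactly 0, or None.
--     for i, p in enumerate(seq):
--         if p == t: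
--             c -= 1
--             if c == 0:
--                 return i + 1
--     return None
--
--
-- def plinko_i(seq, b, m, s):
--     if not b or not m or not s:
--         return 0
--     best = len(seq)
--     for d in (deplete(seq, 0, b), deplete(seq, 1, m), deplete(seq, 2, s)):
--         if d is not None and d < best:
--             best = d
--     return best
-- ===== Notes on version B (the rewrite author's own statement) =====
-- stated objective: alternative
-- what changed: B replaces A's single walk that decrements three counters with early return by three independent per-value scans that each locate their counter's exact depletion index, combined by taking the minimum with default len(seq).
import Mathlib
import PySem

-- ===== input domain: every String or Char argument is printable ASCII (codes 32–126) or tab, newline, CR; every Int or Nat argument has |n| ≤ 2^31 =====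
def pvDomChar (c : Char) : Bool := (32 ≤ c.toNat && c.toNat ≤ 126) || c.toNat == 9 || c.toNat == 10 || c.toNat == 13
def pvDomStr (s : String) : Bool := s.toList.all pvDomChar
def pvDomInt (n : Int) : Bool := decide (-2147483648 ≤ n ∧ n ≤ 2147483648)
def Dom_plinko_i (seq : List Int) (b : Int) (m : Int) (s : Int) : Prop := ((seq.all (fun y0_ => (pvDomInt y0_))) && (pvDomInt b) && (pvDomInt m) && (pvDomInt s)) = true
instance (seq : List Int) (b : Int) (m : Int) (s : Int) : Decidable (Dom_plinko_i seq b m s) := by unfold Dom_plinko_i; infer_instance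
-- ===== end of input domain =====

-- B replaces A's single decrementing walk by three independent per-value depletion scans combined by a minimum; same cost, different decomposition. Neither program mutates its arguments.

-- ===== PORT A =====
-- A's for-loop: i is the running enumerate index; `none` = the loop fell through (Python then returns len(seq))
def pvLoopA : List Int → Int → Int → Int → Int → Option Int
  | [], _, _, _, _ => none
  | p :: rest, i, b, m, s =>
    let t : Int × Int × Int :=
      if p = 0 then (b - 1, m, s)
      else if p = 1 then (b, m - 1, s)
      else if p = 2 then (b, m, s - 1)
      else (b, m, s)
    if t.1 = 0 ∨ t.2.1 = 0 ∨ t.2.2 = 0 then some (i + 1)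
    else pvLoopA rest (i + 1) t.1 t.2.1 t.2.2

def plinko_i (seq : List Int) (b : Int) (m : Int) (s : Int) : Int :=
  if b = 0 ∨ m = 0 ∨ s = 0 then 0
  else (pvLoopA seq 0 b m s).getD (seq.length : Int)

-- ===== PORT B =====
-- Source B's deplete: i is the running enumerate index (0 at the top-level call)
def pvDeplete : List Int → Int → Int → Int → Option Int
  | [], _, _, _ => none
  | p :: rest, t, c, i =>
    if p = t then
      let c' := c - 1
      if c' = 0 then some (i + 1) else pvDeplete rest t c' (i + 1)
    else pvDeplete rest t c (i + 1)

-- the body of Source B's `for d in …: if d is not None and d < best: best = d`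
def pvStep (best : Int) (d : Option Int) : Int :=
  match d with
  | some v => if v < best then v else best
  | none => best

def plinko_i_alt (seq : List Int) (b : Int) (m : Int) (s : Int) : Int :=
  if b = 0 ∨ m = 0 ∨ s = 0 then 0
  else
    [pvDeplete seq 0 b 0, pvDeplete seq 1 m 0, pvDeplete seq 2 s 0].foldl
      pvStep (seq.length : Int)

-- ===== PRECONDITION & SPEC =====
def Spec_plinko_i (seq : List Int) (b : Int) (m : Int) (s : Int) (out : Int) : Prop := out = plinko_i_alt seq b m s
instance (seq : List Int) (b : Int) (m : Int) (s : Int) (out : Int) : Decidable (Spec_plinko_i seq b m s out) := by unfold Spec_plinko_i; infer_instance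

-- ===== CLAIM (what is proved, stated in full; the proofs are below) =====
def Claim_equal_plinko_i : Prop := ∀ (seq : List Int) (b : Int) (m : Int) (s : Int), Dom_plinko_i seq b m s → Spec_plinko_i seq b m s (plinko_i seq b m s)

-- ===== LEMMAS AND PROOFS =====

-- any index deplete returns is strictly past the start index
theorem pvDeplete_ge {seq : List Int} {t c i v : Int}
    (h : pvDeplete seq t c i = some v) : i + 1 ≤ v := by
  induction seq generalizing c i with
  | nil => simp [pvDeplete] at h
  | cons p rest ih =>
    simp only [pvDeplete] at h
    split_ifs at h with h1 h2
    · simp only [Option.some.injEq] at h; omega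
    · have := ih h; omega
    · have := ih h; omega

-- key invariant: with all three counters nonzero, A's loop from index i equals
-- B's fold of the three depletion scans started at index i
theorem pv_key (seq : List Int) :
    ∀ (i b m s : Int), b ≠ 0 → m ≠ 0 → s ≠ 0 →
    (pvLoopA seq i b m s).getD (i + (seq.length : Int)) =
    [pvDeplete seq 0 b i, pvDeplete seq 1 m i, pvDeplete seq 2 s i].foldl
      pvStep (i + (seq.length : Int)) := by
  induction seq with
  | nil => intro i b m s hb hm hs; simp [pvLoopA, pvDeplete, pvStep]
  | cons p rest ih =>
    intro i b m s hb hm hs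
    by_cases hp0 : p = 0
    · subst hp0
      by_cases hb1 : b = 1
      · subst hb1
        simp only [pvLoopA, pvDeplete, List.length_cons, List.foldl_cons, List.foldl_nil]
        norm_num
        rcases hd1 : pvDeplete rest 1 m (i + 1) with _ | v1 <;>
          rcases hd2 : pvDeplete rest 2 s (i + 1) with _ | v2 <;>
            dsimp only [pvStep] <;>
              [skip; (have := pvDeplete_ge hd2); (have := pvDeplete_ge hd1);
               (have h1 := pvDeplete_ge hd1; have h2 := pvDeplete_ge hd2)] <;>
                push_cast <;> split_ifs <;> omega
      · have hb' : b - 1 ≠ 0 := by omega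
        simp only [pvLoopA, pvDeplete, List.length_cons]
        norm_num [hb', hm, hs]
        rw [show (i : Int) + ((rest.length : Int) + 1) = (i + 1) + (rest.length : Int) by ring]
        exact ih (i + 1) (b - 1) m s hb' hm hs
    · by_cases hp1 : p = 1
      · subst hp1
        by_cases hm1 : m = 1
        · subst hm1
          simp only [pvLoopA, pvDeplete, List.length_cons, List.foldl_cons, List.foldl_nil]
          norm_num
          rcases hd0 : pvDeplete rest 0 b (i + 1) with _ | v0 <;>
            rcases hd2 : pvDeplete rest 2 s (i + 1) with _ | v2 <;>
              dsimp only [pvStep] <;>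
                [skip; (have := pvDeplete_ge hd2); (have := pvDeplete_ge hd0);
                 (have h1 := pvDeplete_ge hd0; have h2 := pvDeplete_ge hd2)] <;>
                  push_cast <;> split_ifs <;> omega
        · have hm' : m - 1 ≠ 0 := by omega
          simp only [pvLoopA, pvDeplete, List.length_cons]
          norm_num [hp0, hm', hb, hs]
          rw [show (i : Int) + ((rest.length : Int) + 1) = (i + 1) + (rest.length : Int) by ring]
          exact ih (i + 1) b (m - 1) s hb hm' hs
      · by_cases hp2 : p = 2
        · subst hp2
          by_cases hs1 : s = 1
          · subst hs1
            simp only [pvLoopA, pvDeplete, List.length_cons, List.foldl_cons, List.foldl_nil]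
            norm_num
            rcases hd0 : pvDeplete rest 0 b (i + 1) with _ | v0 <;>
              rcases hd1 : pvDeplete rest 1 m (i + 1) with _ | v1 <;>
                dsimp only [pvStep] <;>
                  [skip; (have := pvDeplete_ge hd1); (have := pvDeplete_ge hd0);
                   (have h1 := pvDeplete_ge hd0; have h2 := pvDeplete_ge hd1)] <;>
                    push_cast <;> split_ifs <;> omega
          · have hs' : s - 1 ≠ 0 := by omega
            simp only [pvLoopA, pvDeplete, List.length_cons]
            norm_num [hp0, hp1, hs', hb, hm]
            rw [show (i : Int) + ((rest.length : Int) + 1) = (i + 1) + (rest.length : Int) by ring]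
            exact ih (i + 1) b m (s - 1) hb hm hs'
        · simp only [pvLoopA, pvDeplete, List.length_cons]
          norm_num [hp0, hp1, hp2, hb, hm, hs]
          rw [show (i : Int) + ((rest.length : Int) + 1) = (i + 1) + (rest.length : Int) by ring]
          exact ih (i + 1) b m s hb hm hs

-- ===== VERDICT (by name: the statement is the Claim_ definition above) =====
theorem plinko_i_spec : Claim_equal_plinko_i := by
  intro seq b m s _
  unfold Spec_plinko_i plinko_i plinko_i_alt
  by_cases h : b = 0 ∨ m = 0 ∨ s = 0
  · simp [h]
  · push_neg at h
    simp only [if_neg (by tauto : ¬(b = 0 ∨ m = 0 ∨ s = 0))]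
    have := pv_key seq 0 b m s h.1 h.2.1 h.2.2
    simpa using this
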